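-- pv_equiv track=rewrite | github.com/ArkisOnet/pipeline-and-rag-system | pipeline/chunker/splitter.py | _merge_split_tables
-- ===== SOURCE A (Python) =====
-- def _chunk_ends_in_table(text: str) -> bool:
--     lines = text.rstrip().splitlines()
--     for line in reversed(lines):
--         stripped = line.strip()
--         if stripped:
--             return stripped.startswith("|")
--     return False
--
-- def _next_chunk_continues_table(text: str) -> bool:
--     first = next((l for l in text.splitlines() if l.strip()), "")
--     return first.strip().startswith("|")
--
-- def _merge_split_tables(texts: list[str]) -> list[str]:
--     merged: list[str] = []
--     i = 0
--     while i < len(texts):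
--         current = texts[i]
--         while (
--             _chunk_ends_in_table(current)
--             and i + 1 < len(texts)
--             and _next_chunk_continues_table(texts[i + 1])
--         ):
--             i += 1
--             current = current + "\n\n" + texts[i]
--         merged.append(current)
--         i += 1
--     return merged
-- ===== SOURCE B (Python) =====
-- def _boundary_glued(prev: str, nxt: str) -> bool:
--     """True when a markdown table runs across the prev|nxt chunk boundary."""
--     prev_lines = [l for l in prev.rstrip().splitlines() if l.strip()]
--     nxt_lines = [l for l in nxt.splitlines() if l.strip()]
--     return (
--         bool(prev_lines)
--         and prev_lines[-1].strip().startswith("|")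
--         and bool(nxt_lines)
--         and nxt_lines[0].strip().startswith("|")
--     )
--
--
-- def _merge_split_tables(texts: list[str]) -> list[str]:
--     # Stage 1: one flag per adjacent boundary, computed from the raw chunks only
--     # (a chunk that continues a table necessarily determines the merged group's
--     # last non-empty line, so this matches testing the accumulated string).
--     glued = [_boundary_glued(a, b) for a, b in zip(texts, texts[1:])]
--     # Stage 2: cut the chunk sequence at every non-glued boundary and join.
--     merged = []
--     start = 0
--     for i in range(len(texts)):
--         if i + 1 == len(texts) or not glued[i]:
--             merged.append("\n\n".join(texts[start:i + 1]))
--             start = i + 1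
--     return merged
-- ===== Notes on version B (the rewrite author's own statement) =====
-- stated objective: alternative
-- what changed: Instead of A's index-driven nested while loops that grow an accumulated string and re-scan its tail for the ends-in-table test, B recursively peels off the first maximal glued run, deciding glue purely from the raw adjacent chunks (correct because a chunk that continues a table determines the merged group's last non-empty line) and joining each run once.
import Mathlib
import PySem

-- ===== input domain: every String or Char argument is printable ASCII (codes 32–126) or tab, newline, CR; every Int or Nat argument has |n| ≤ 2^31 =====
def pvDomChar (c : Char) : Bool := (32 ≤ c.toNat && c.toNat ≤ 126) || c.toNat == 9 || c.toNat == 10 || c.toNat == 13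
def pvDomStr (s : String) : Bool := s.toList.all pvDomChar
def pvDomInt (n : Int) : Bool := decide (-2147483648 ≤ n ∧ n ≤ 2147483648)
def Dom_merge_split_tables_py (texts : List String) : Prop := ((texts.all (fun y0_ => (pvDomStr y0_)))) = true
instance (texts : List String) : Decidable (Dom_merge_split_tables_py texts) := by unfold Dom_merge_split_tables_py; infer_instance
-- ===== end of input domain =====

-- B replaces A's nested while loops (which grow an accumulated string and re-scan it)
-- by a recursive peel-off of the first maximal glued run, deciding glue from the raw
-- adjacent chunks and joining each run once (objective: alternative decomposition).

-- ===== PORT A =====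
-- for line in reversed(lines): stripped = line.strip(); if stripped: return stripped.startswith("|"); return False
def pvEndsLoopA : List String → Bool
  | [] => false
  | line :: rest =>
    let stripped := PySem.Str.strip line
    if stripped ≠ "" then PySem.Str.startswith stripped "|" else pvEndsLoopA rest

def chunk_ends_in_table_py (text : String) : Bool :=
  pvEndsLoopA ((PySem.Str.splitlines (PySem.Str.rstrip text)).reverse)

-- first = next((l for l in text.splitlines() if l.strip()), "")
def next_chunk_continues_table_py (text : String) : Bool :=
  let first := (((PySem.Str.splitlines text).find? (fun l => PySem.Str.strip l ≠ "")).getD "")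
  PySem.Str.startswith (PySem.Str.strip first) "|"

-- the nested while loops of A: `current` accumulates while the inner condition holds,
-- then is appended and the outer loop resumes at the next index
def pvMergeLoopA (current : String) (rest : List String) : List String :=
  match rest with
  | [] => [current]
  | nxt :: rest' =>
    if chunk_ends_in_table_py current && next_chunk_continues_table_py nxt then
      pvMergeLoopA (current ++ "\n\n" ++ nxt) rest'
    else
      current :: pvMergeLoopA nxt rest'

def merge_split_tables_py (texts : List String) : List String :=
  match texts with
  | [] => []
  | t :: rest => pvMergeLoopA t rest

-- ===== PORT B =====
-- _boundary_glued(prev, nxt): filtered non-blank lines; last of prev's and first of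
-- nxt's (guarded by bool(...)) must start with '|'
def pvGluedB (prev nxt : String) : Bool :=
  (match ((PySem.Str.splitlines (PySem.Str.rstrip prev)).filter
      (fun l => PySem.Str.strip l ≠ "")).getLast? with
   | some l => PySem.Str.startswith (PySem.Str.strip l) "|"
   | none => false)
  &&
  (match ((PySem.Str.splitlines nxt).filter (fun l => PySem.Str.strip l ≠ "")).head? with
   | some l => PySem.Str.startswith (PySem.Str.strip l) "|"
   | none => false)

-- the 'for i in range(len(texts))' cut loop; when it is read, glued[i] is always in
-- range (i + 1 < len(texts)), so the getD default is never consulted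
def pvCutLoop (texts : List String) (glued : List Bool) (i start : Nat) : List String :=
  if i < texts.length then
    (if i + 1 = texts.length || !(glued.getD i false) then
      PySem.Str.join "\n\n"
          (PySem.List.slice texts (some (start : Int)) (some ((i + 1 : Nat) : Int)))
        :: pvCutLoop texts glued (i + 1) (i + 1)
    else pvCutLoop texts glued (i + 1) start)
  else []
termination_by texts.length - i

-- glued = [_boundary_glued(a, b) for a, b in zip(texts, texts[1:])], then the cut loop
def merge_split_tables_py_alt (texts : List String) : List String :=
  pvCutLoop texts ((texts.zip texts.tail).map (fun p => pvGluedB p.1 p.2)) 0 0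

-- ===== PRECONDITION & SPEC =====
def Spec_merge_split_tables_py (texts : List String) (out : List String) : Prop := out = merge_split_tables_py_alt texts
instance (texts : List String) (out : List String) : Decidable (Spec_merge_split_tables_py texts out) := by unfold Spec_merge_split_tables_py; infer_instance

-- ===== CLAIM =====
def Claim_equal_merge_split_tables_py : Prop := ∀ (texts : List String), Dom_merge_split_tables_py texts → Spec_merge_split_tables_py texts (merge_split_tables_py texts)

-- ===== LEMMAS AND PROOFS =====

-- the line-break predicate `splitlines` uses internally (named, for the go-lemmas)
def pvIsBreak (c : Char) : Bool :=
  decide (c.toNat = 10) || decide (c.toNat = 13) || decide (c.toNat = 11) || decide (c.toNat = 12) ||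
    decide (c.toNat = 28) || decide (c.toNat = 29) || decide (c.toNat = 30) ||
    decide (c.toNat = 133) || decide (c.toNat = 8232) || decide (c.toNat = 8233)

lemma splitlines_eq_go (s : List Char) :
    PySem.Chars.splitlines s = PySem.Chars.splitlines.go pvIsBreak s [] [] := rfl

lemma go_nil (isB : Char → Bool) (cur : List Char) (acc : List (List Char)) :
    PySem.Chars.splitlines.go isB [] cur acc =
      (if cur.isEmpty then acc.reverse else (cur.reverse :: acc).reverse) := by
  simp [PySem.Chars.splitlines.go]

lemma go_crlf (isB : Char → Bool) (rest cur : List Char) (acc : List (List Char)) :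
    PySem.Chars.splitlines.go isB ('\x0d' :: '\n' :: rest) cur acc =
      PySem.Chars.splitlines.go isB rest [] (cur.reverse :: acc) := by
  simp [PySem.Chars.splitlines.go]

lemma go_step (isB : Char → Bool) (c : Char) (rest cur : List Char) (acc : List (List Char))
    (hcr : ¬ (c = '\x0d' ∧ rest.head? = some '\n')) :
    PySem.Chars.splitlines.go isB (c :: rest) cur acc =
      (if isB c then PySem.Chars.splitlines.go isB rest [] (cur.reverse :: acc)
       else PySem.Chars.splitlines.go isB rest (c :: cur) acc) := by
  match c, rest with
  | c, [] =>
    by_cases h : isB c <;> simp [PySem.Chars.splitlines.go, h]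
  | c, d :: rest' =>
    by_cases hc : c = '\x0d'
    · subst hc
      have hd : d ≠ '\n' := by intro h; exact hcr ⟨rfl, by simp [h]⟩
      by_cases h : isB '\x0d' <;> simp [PySem.Chars.splitlines.go, h, hd]
    · by_cases h : isB c <;> simp [PySem.Chars.splitlines.go, h, hc]

-- the accumulator of go only prepends (reversed) to the result
lemma go_acc_bound (isB : Char → Bool) :
    ∀ (n : Nat) (s : List Char), s.length ≤ n → ∀ (cur : List Char) (acc : List (List Char)),
      PySem.Chars.splitlines.go isB s cur acc =
        acc.reverse ++ PySem.Chars.splitlines.go isB s cur [] := by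
  intro n
  induction n with
  | zero =>
    intro s hs cur acc
    have : s = [] := List.eq_nil_of_length_eq_zero (Nat.le_zero.mp hs)
    subst this
    simp [go_nil]; split <;> simp
  | succ n ih =>
    intro s hs cur acc
    match s with
    | [] => simp [go_nil]; split <;> simp
    | c :: rest =>
      by_cases hcr : c = '\x0d' ∧ rest.head? = some '\n'
      · obtain ⟨hc, hd⟩ := hcr
        subst hc
        cases rest with
        | nil => simp at hd
        | cons d rest' =>
          simp only [List.head?_cons, Option.some.injEq] at hd
          subst hd
          rw [go_crlf, go_crlf,
            ih rest' (by simp at hs; omega) [] (cur.reverse :: acc),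
            ih rest' (by simp at hs; omega) [] [cur.reverse]]
          simp
      · rw [go_step isB c rest cur acc hcr, go_step isB c rest cur [] hcr]
        by_cases h : isB c
        · rw [if_pos h, if_pos h,
            ih rest (by simp at hs; omega) [] (cur.reverse :: acc),
            ih rest (by simp at hs; omega) [] [cur.reverse]]
          simp
        · rw [if_neg h, if_neg h, ih rest (by simp at hs; omega) (c :: cur) acc]

lemma go_acc (isB : Char → Bool) (s : List Char) (cur : List Char) (acc : List (List Char)) :
    PySem.Chars.splitlines.go isB s cur acc =
      acc.reverse ++ PySem.Chars.splitlines.go isB s cur [] :=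
  go_acc_bound isB s.length s le_rfl cur acc

-- a '\n' inserted in the middle splits the computation of go
lemma go_break_bound (isB : Char → Bool) (hn : isB '\n' = true) (y : List Char) :
    ∀ (n : Nat) (x : List Char), x.length ≤ n → ∀ (cur : List Char) (acc : List (List Char)),
      PySem.Chars.splitlines.go isB (x ++ '\n' :: y) cur acc =
        PySem.Chars.splitlines.go isB (x ++ ['\n']) cur acc ++
          PySem.Chars.splitlines.go isB y [] [] := by
  intro n
  induction n with
  | zero =>
    intro x hx cur acc
    have : x = [] := List.eq_nil_of_length_eq_zero (Nat.le_zero.mp hx)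
    subst this
    simp only [List.nil_append]
    rw [go_step isB '\n' y cur acc (by simp), if_pos hn,
      go_step isB '\n' [] cur acc (by simp), if_pos hn,
      go_acc isB y [] (cur.reverse :: acc), go_nil]
    simp
  | succ n ih =>
    intro x hx cur acc
    match x with
    | [] =>
      simp only [List.nil_append]
      rw [go_step isB '\n' y cur acc (by simp), if_pos hn,
        go_step isB '\n' [] cur acc (by simp), if_pos hn,
        go_acc isB y [] (cur.reverse :: acc), go_nil]
      simp
    | c :: x' =>
      by_cases hcr : c = '\x0d' ∧ (x' ++ '\n' :: y).head? = some '\n'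
      · obtain ⟨hc, hd⟩ := hcr
        subst hc
        cases x' with
        | nil =>
          simp only [List.cons_append, List.nil_append]
          rw [go_crlf, go_crlf, go_acc isB y [] (cur.reverse :: acc), go_nil]
          simp
        | cons c' x'' =>
          simp only [List.cons_append, List.head?_cons, Option.some.injEq] at hd
          subst hd
          simp only [List.cons_append]
          rw [go_crlf, go_crlf]
          exact ih x'' (by simp at hx; omega) [] (cur.reverse :: acc)
      · have hcr' : ¬ (c = '\x0d' ∧ (x' ++ ['\n']).head? = some '\n') := by
          intro ⟨h1, h2⟩
          refine hcr ⟨h1, ?_⟩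
          match x' with
          | [] => simp
          | d :: x'' => simpa using h2
        simp only [List.cons_append]
        rw [go_step isB c _ cur acc hcr, go_step isB c _ cur acc hcr']
        by_cases h : isB c
        · rw [if_pos h, if_pos h]
          exact ih x' (by simp at hx; omega) [] (cur.reverse :: acc)
        · rw [if_neg h, if_neg h]
          exact ih x' (by simp at hx; omega) (c :: cur) acc

lemma splitlines_append_nl (x y : List Char) :
    PySem.Chars.splitlines (x ++ '\n' :: y) =
      PySem.Chars.splitlines (x ++ ['\n']) ++ PySem.Chars.splitlines y := by
  rw [splitlines_eq_go, splitlines_eq_go, splitlines_eq_go]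
  exact go_break_bound pvIsBreak (by decide) y x.length x le_rfl [] []

-- every character of a produced line comes from the input (or cur/acc)
lemma go_line_mem_bound (isB : Char → Bool) (c : Char) :
    ∀ (n : Nat) (s : List Char), s.length ≤ n → ∀ (cur : List Char) (acc : List (List Char))
      (l : List Char), l ∈ PySem.Chars.splitlines.go isB s cur acc → c ∈ l →
        c ∈ s ∨ c ∈ cur ∨ ∃ l' ∈ acc, c ∈ l' := by
  intro n
  induction n with
  | zero =>
    intro s hs cur acc l hl hc
    have : s = [] := List.eq_nil_of_length_eq_zero (Nat.le_zero.mp hs)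
    subst this
    rw [go_nil] at hl
    split at hl
    · rw [List.mem_reverse] at hl; right; right; exact ⟨l, hl, hc⟩
    · rw [List.mem_reverse, List.mem_cons] at hl
      rcases hl with h | h
      · right; left; rw [← List.mem_reverse, ← h]; exact hc
      · right; right; exact ⟨l, h, hc⟩
  | succ n ih =>
    intro s hs cur acc l hl hc
    match s with
    | [] =>
      rw [go_nil] at hl
      split at hl
      · rw [List.mem_reverse] at hl; right; right; exact ⟨l, hl, hc⟩
      · rw [List.mem_reverse, List.mem_cons] at hl
        rcases hl with h | h
        · right; left; rw [← List.mem_reverse, ← h]; exact hc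
        · right; right; exact ⟨l, h, hc⟩
    | d :: rest =>
      by_cases hcr : d = '\x0d' ∧ rest.head? = some '\n'
      · obtain ⟨hd, hh⟩ := hcr
        subst hd
        cases rest with
        | nil => simp at hh
        | cons e rest' =>
          simp only [List.head?_cons, Option.some.injEq] at hh
          subst hh
          rw [go_crlf] at hl
          rcases ih rest' (by simp at hs; omega) [] (cur.reverse :: acc) l hl hc with h | h | ⟨l', hl', hc'⟩
          · left; simp [h]
          · simp at h
          · rw [List.mem_cons] at hl'
            rcases hl' with h | h
            · right; left; rw [← List.mem_reverse, ← h]; exact hc'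
            · right; right; exact ⟨l', h, hc'⟩
      · rw [go_step isB d rest cur acc hcr] at hl
        split at hl
        · rcases ih rest (by simp at hs; omega) [] (cur.reverse :: acc) l hl hc with h | h | ⟨l', hl', hc'⟩
          · left; simp [h]
          · simp at h
          · rw [List.mem_cons] at hl'
            rcases hl' with h | h
            · right; left; rw [← List.mem_reverse, ← h]; exact hc'
            · right; right; exact ⟨l', h, hc'⟩
        · rcases ih rest (by simp at hs; omega) (d :: cur) acc l hl hc with h | h | h
          · left; simp [h]
          · simp at h
            rcases h with h | h
            · left; simp [h]
            · right; left; exact h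
          · right; right; exact h

-- every non-break character of the input lands in some produced line
lemma go_line_surj_bound (isB : Char → Bool) (hr : isB '\x0d' = true) (hn : isB '\n' = true)
    (c : Char) (hc : isB c = false) :
    ∀ (n : Nat) (s : List Char), s.length ≤ n → ∀ (cur : List Char) (acc : List (List Char)),
      (c ∈ s ∨ c ∈ cur) → ∃ l ∈ PySem.Chars.splitlines.go isB s cur acc, c ∈ l := by
  intro n
  induction n with
  | zero =>
    intro s hs cur acc hmem
    have : s = [] := List.eq_nil_of_length_eq_zero (Nat.le_zero.mp hs)
    subst this
    rcases hmem with h | h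
    · simp at h
    · have hne : cur.isEmpty = false := by
        cases cur with
        | nil => simp at h
        | cons a b => rfl
      rw [go_nil, if_neg (by simp [hne])]
      exact ⟨cur.reverse, by simp, by simp [h]⟩
  | succ n ih =>
    intro s hs cur acc hmem
    match s with
    | [] =>
      rcases hmem with h | h
      · simp at h
      · have hne : cur.isEmpty = false := by
          cases cur with
          | nil => simp at h
          | cons a b => rfl
        rw [go_nil, if_neg (by simp [hne])]
        exact ⟨cur.reverse, by simp, by simp [h]⟩
    | d :: rest =>
      by_cases hcr : d = '\x0d' ∧ rest.head? = some '\n'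
      · obtain ⟨hd, hh⟩ := hcr
        subst hd
        cases rest with
        | nil => simp at hh
        | cons e rest' =>
          simp only [List.head?_cons, Option.some.injEq] at hh
          subst hh
          rw [go_crlf]
          have hcs : c ∈ rest' ∨ c ∈ cur := by
            rcases hmem with h | h
            · simp at h
              rcases h with h | h | h
              · exfalso; subst h; rw [hr] at hc; exact absurd hc (by simp)
              · exfalso; subst h; rw [hn] at hc; exact absurd hc (by simp)
              · left; exact h
            · right; exact h
          rcases hcs with h | h
          · exact ih rest' (by simp at hs; omega) [] (cur.reverse :: acc) (Or.inl h)
          · -- c is in cur, which is flushed into the accumulator: find it there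
            have := go_acc isB rest' [] (cur.reverse :: acc)
            rw [this]
            exact ⟨cur.reverse, by simp, by simp [h]⟩
      · rw [go_step isB d rest cur acc hcr]
        by_cases hb : isB d
        · rw [if_pos hb]
          have hdc : c ≠ d := by intro h; rw [h] at hc; rw [hb] at hc; exact absurd hc (by simp)
          have hcs : c ∈ rest ∨ c ∈ cur := by
            rcases hmem with h | h
            · simp at h
              rcases h with h | h
              · exact absurd h hdc
              · left; exact h
            · right; exact h
          rcases hcs with h | h
          · exact ih rest (by simp at hs; omega) [] (cur.reverse :: acc) (Or.inl h)
          · have := go_acc isB rest [] (cur.reverse :: acc)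
            rw [this]
            exact ⟨cur.reverse, by simp, by simp [h]⟩
        · rw [if_neg hb]
          apply ih rest (by simp at hs; omega) (d :: cur) acc
          rcases hmem with h | h
          · simp at h
            rcases h with h | h
            · right; simp [h]
            · left; exact h
          · right; simp [h]

lemma isbreak_not_space (c : Char) (h : PySem.Chars.isspace c = false) : pvIsBreak c = false := by
  simp only [PySem.Chars.isspace, Bool.or_eq_false_iff, Bool.and_eq_false_iff,
    decide_eq_false_iff_not, not_le] at h
  simp only [pvIsBreak, Bool.or_eq_false_iff, decide_eq_false_iff_not]
  omega

lemma strip_eq_nil_iff (l : List Char) :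
    PySem.Chars.strip l = [] ↔ ∀ c ∈ l, PySem.Chars.isspace c = true := by
  simp only [PySem.Chars.strip, PySem.Chars.rstrip, PySem.Chars.lstrip,
    List.reverse_eq_nil_iff, List.dropWhile_eq_nil_iff, List.mem_reverse]
  constructor
  · intro h c hc
    conv at hc => rw [← List.takeWhile_append_dropWhile (p := PySem.Chars.isspace) (l := l)]
    rcases List.mem_append.mp hc with h1 | h1
    · exact List.mem_takeWhile_imp h1
    · exact h c h1
  · intro h c hc
    exact h c ((List.dropWhile_sublist _).mem hc)

lemma exists_nonspace_rstrip (t : List Char) (h : ∃ c ∈ t, PySem.Chars.isspace c = false) :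
    ∃ c ∈ PySem.Chars.rstrip t, PySem.Chars.isspace c = false := by
  obtain ⟨c, hc, hcs⟩ := h
  refine ⟨c, ?_, hcs⟩
  simp only [PySem.Chars.rstrip, List.mem_reverse]
  have hc' : c ∈ t.reverse := List.mem_reverse.mpr hc
  conv at hc' => rw [← List.takeWhile_append_dropWhile (p := PySem.Chars.isspace) (l := t.reverse)]
  rcases List.mem_append.mp hc' with h1 | h1
  · exact absurd (List.mem_takeWhile_imp h1) (by simp [hcs])
  · exact h1

lemma rstrip_append (s t : List Char) (h : ∃ c ∈ t, PySem.Chars.isspace c = false) :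
    PySem.Chars.rstrip (s ++ t) = s ++ PySem.Chars.rstrip t := by
  have hne : (List.dropWhile PySem.Chars.isspace t.reverse).isEmpty = false := by
    rw [List.isEmpty_eq_false_iff, Ne, List.dropWhile_eq_nil_iff]
    intro hall
    obtain ⟨c, hc, hcs⟩ := h
    exact absurd (hall c (List.mem_reverse.mpr hc)) (by simp [hcs])
  simp only [PySem.Chars.rstrip, List.reverse_append, List.dropWhile_append, hne,
    Bool.false_eq_true, if_false]
  simp

lemma str_ne_empty_iff (x : String) : (x ≠ "") ↔ x.toList ≠ [] := by
  constructor
  · intro h h'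
    exact h (String.toList_inj.mp (by simp [h']))
  · intro h h'
    exact h (by simp [h'])

lemma endsLoopA_append (l1 l2 : List String) (h : ∃ l ∈ l1, PySem.Str.strip l ≠ "") :
    pvEndsLoopA (l1 ++ l2) = pvEndsLoopA l1 := by
  induction l1 with
  | nil => simp at h
  | cons x l1' ih =>
    simp only [List.cons_append, pvEndsLoopA]
    by_cases hx : PySem.Str.strip x ≠ ""
    · simp [hx]
    · simp only [hx, if_false]
      apply ih
      rcases h with ⟨l, hl, hls⟩
      rcases List.mem_cons.mp hl with rfl | hl'
      · exact absurd hls hx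
      · exact ⟨l, hl', hls⟩

lemma str_splitlines_ofList (cs : List Char) :
    PySem.Str.splitlines (String.ofList cs) = (PySem.Chars.splitlines cs).map String.ofList := by
  simp [PySem.Str.splitlines]

-- a chunk with a non-blank line has a non-blank line in its splitlines (after rstrip)
lemma exists_nonblank_line (u : List Char) (h : ∃ c ∈ u, PySem.Chars.isspace c = false) :
    ∃ l ∈ PySem.Chars.splitlines u, PySem.Chars.strip l ≠ [] := by
  obtain ⟨c, hc, hcs⟩ := h
  have hb : pvIsBreak c = false := isbreak_not_space c hcs
  obtain ⟨l, hl, hcl⟩ := go_line_surj_bound pvIsBreak (by decide) (by decide) c hb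
    u.length u le_rfl [] [] (Or.inl hc)
  refine ⟨l, by rwa [splitlines_eq_go], ?_⟩
  intro hnil
  rw [strip_eq_nil_iff] at hnil
  exact absurd (hnil c hcl) (by simp [hcs])

lemma line_char_mem (u l : List Char) (c : Char)
    (hl : l ∈ PySem.Chars.splitlines u) (hc : c ∈ l) : c ∈ u := by
  rw [splitlines_eq_go] at hl
  rcases go_line_mem_bound pvIsBreak c u.length u le_rfl [] [] l hl hc with h | h | ⟨l', hl', _⟩
  · exact h
  · simp at h
  · simp at hl'

-- KEY: appending "\n\n" ++ t to anything does not change the ends-in-table test,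
-- as long as t holds a non-blank line
lemma ends_append_of_continues (s t : String)
    (h : next_chunk_continues_table_py t = true) :
    chunk_ends_in_table_py (s ++ "\n\n" ++ t) = chunk_ends_in_table_py t := by
  -- t has a non-blank character
  have hns : ∃ c ∈ t.toList, PySem.Chars.isspace c = false := by
    unfold next_chunk_continues_table_py at h
    cases hf : (PySem.Str.splitlines t).find? (fun l => decide (PySem.Str.strip l ≠ "")) with
    | none =>
      rw [hf] at h
      exact absurd h (by decide)
    | some l0 =>
      rw [hf] at h
      have hl0p : PySem.Str.strip l0 ≠ "" := by simpa using List.find?_some hf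
      have hl0mem : l0 ∈ PySem.Str.splitlines t := List.mem_of_find?_eq_some hf
      rw [str_ne_empty_iff] at hl0p
      rw [PySem.Str.toList_strip] at hl0p
      have : ∃ c ∈ l0.toList, PySem.Chars.isspace c = false := by
        by_contra hcon
        push Not at hcon
        exact hl0p ((strip_eq_nil_iff _).mpr (by intro c hc; simpa using hcon c hc))
      obtain ⟨c, hc, hcs⟩ := this
      refine ⟨c, ?_, hcs⟩
      have : l0.toList ∈ PySem.Chars.splitlines t.toList := by
        unfold PySem.Str.splitlines at hl0mem
        obtain ⟨cl, hclmem, hcl⟩ := List.mem_map.mp hl0mem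
        rw [← hcl]
        simpa using hclmem
      exact line_char_mem t.toList l0.toList c this hc
  have hsl : PySem.Str.rstrip (s ++ "\n\n" ++ t) =
      String.ofList ((s.toList ++ ['\n']) ++ '\n' :: PySem.Chars.rstrip t.toList) := by
    show String.ofList (PySem.Chars.rstrip (s ++ "\n\n" ++ t).toList) = _
    have h2 : (s ++ "\n\n" ++ t).toList = (s.toList ++ ['\n', '\n']) ++ t.toList := by
      simp only [String.toList_append]
      rw [show ("\n\n" : String).toList = ['\n', '\n'] from rfl]
    rw [h2, rstrip_append _ _ hns]
    rw [show (s.toList ++ ['\n', '\n']) ++ PySem.Chars.rstrip t.toList =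
      (s.toList ++ ['\n']) ++ '\n' :: PySem.Chars.rstrip t.toList by simp]
  unfold chunk_ends_in_table_py
  rw [hsl, str_splitlines_ofList, splitlines_append_nl, List.map_append, List.reverse_append]
  have hex : ∃ l ∈ ((PySem.Chars.splitlines (PySem.Chars.rstrip t.toList)).map String.ofList).reverse,
      PySem.Str.strip l ≠ "" := by
    obtain ⟨cl, hclmem, hclne⟩ := exists_nonblank_line _ (exists_nonspace_rstrip _ hns)
    refine ⟨String.ofList cl, ?_, ?_⟩
    · rw [List.mem_reverse]
      exact List.mem_map.mpr ⟨cl, hclmem, rfl⟩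
    · rw [str_ne_empty_iff, PySem.Str.toList_strip]
      simpa using hclne
  rw [endsLoopA_append _ _ hex]
  have ht : PySem.Str.rstrip t = String.ofList (PySem.Chars.rstrip t.toList) := rfl
  rw [ht, str_splitlines_ofList]

lemma endsLoopA_eq_find? (l : List String) :
    pvEndsLoopA l = (match l.find? (fun x => decide (PySem.Str.strip x ≠ "")) with
      | some x => PySem.Str.startswith (PySem.Str.strip x) "|"
      | none => false) := by
  induction l with
  | nil => rfl
  | cons x l' ih =>
    simp only [pvEndsLoopA, List.find?_cons]
    by_cases h : PySem.Str.strip x ≠ "" <;> simp [h, ih]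

-- B's boundary test is A's two scans on the raw chunks
lemma glued_eq (prev nxt : String) :
    pvGluedB prev nxt =
      (chunk_ends_in_table_py prev && next_chunk_continues_table_py nxt) := by
  unfold pvGluedB chunk_ends_in_table_py next_chunk_continues_table_py
  rw [List.getLast?_eq_head?_reverse, ← List.filter_reverse, List.head?_filter,
    List.head?_filter, ← endsLoopA_eq_find?]
  cases hf : (PySem.Str.splitlines nxt).find? (fun l => decide (PySem.Str.strip l ≠ "")) with
  | none =>
    simp
    intro _
    decide
  | some l0 =>
    simp

lemma foldl_append_sep (sep : List Char) (cs : List (List Char)) : ∀ (a b : List Char),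
    cs.foldl (fun a x => a ++ sep ++ x) (a ++ b) = a ++ cs.foldl (fun a x => a ++ sep ++ x) b := by
  induction cs with
  | nil => intro a b; rfl
  | cons x cs' ih =>
    intro a b
    rw [List.foldl_cons, List.foldl_cons]
    rw [show a ++ b ++ sep ++ x = a ++ (b ++ sep ++ x) from by simp]
    exact ih a (b ++ sep ++ x)

lemma chars_join_cons (sep c : List Char) (cs : List (List Char)) :
    PySem.Chars.join sep (c :: cs) = cs.foldl (fun a x => a ++ sep ++ x) c := by
  induction cs generalizing c with
  | nil => exact PySem.Chars.join_singleton sep c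
  | cons d cs' ih =>
    rw [PySem.Chars.join_cons_cons, List.foldl_cons, ih d]
    rw [show c ++ sep ++ d = (c ++ sep) ++ d from by simp, foldl_append_sep]

lemma toList_foldl_append (run : List String) : ∀ (t : String),
    (run.foldl (fun a x => a ++ "\n\n" ++ x) t).toList =
      (run.map String.toList).foldl (fun a x => a ++ ('\n' :: '\n' :: []) ++ x) t.toList := by
  induction run with
  | nil => intro t; rfl
  | cons x run' ih =>
    intro t
    simp only [List.foldl_cons, List.map_cons, ih]
    congr 1
    simp only [String.toList_append]
    rw [show ("\n\n" : String).toList = ['\n', '\n'] from rfl]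

lemma str_join_cons (t : String) (run : List String) :
    PySem.Str.join "\n\n" (t :: run) = run.foldl (fun a x => a ++ "\n\n" ++ x) t := by
  apply String.toList_inj.mp
  rw [PySem.Str.toList_join, toList_foldl_append]
  simp only [List.map_cons]
  rw [chars_join_cons]
  rw [show ("\n\n" : String).toList = ['\n', '\n'] from rfl]

-- B's recursion, unfolded through the slices
-- proof-side view of B: the length of the glued run after a first chunk, and the
-- run-peeling recursion both loops compute
def pvRunB (prev : String) : List String → Nat
  | [] => 0
  | nxt :: rest => if pvGluedB prev nxt then 1 + pvRunB nxt rest else 0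

def pvRunsRec (texts : List String) : List String :=
  match texts with
  | [] => []
  | t :: rest =>
    PySem.Str.join "\n\n" (t :: rest.take (pvRunB t rest))
      :: pvRunsRec (rest.drop (pvRunB t rest))
termination_by texts.length
decreasing_by
  simp only [List.length_drop, List.length_cons]
  omega

lemma runsRec_cons (t : String) (rest : List String) :
    pvRunsRec (t :: rest) =
      ((rest.take (pvRunB t rest)).foldl (fun a x => a ++ "\n\n" ++ x) t)
        :: pvRunsRec (rest.drop (pvRunB t rest)) := by
  rw [pvRunsRec, str_join_cons]

-- MAIN: A's nested loop produces exactly B's run-peeling, as long as the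
-- ends-in-table value of the accumulated string is that of its last raw chunk
lemma mergeA_run (rest : List String) : ∀ (t s : String),
    chunk_ends_in_table_py s = chunk_ends_in_table_py t →
    pvMergeLoopA s rest =
      ((rest.take (pvRunB t rest)).foldl (fun a x => a ++ "\n\n" ++ x) s)
        :: pvRunsRec (rest.drop (pvRunB t rest)) := by
  induction rest with
  | nil =>
    intro t s hE
    simp [pvMergeLoopA, pvRunB, pvRunsRec]
  | cons n r ih =>
    intro t s hE
    rw [pvMergeLoopA, pvRunB, glued_eq]
    by_cases h : (chunk_ends_in_table_py t && next_chunk_continues_table_py n) = true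
    · rw [if_pos h, if_pos (by rw [hE]; exact h)]
      have hcont : next_chunk_continues_table_py n = true := (Bool.and_eq_true _ _ |>.mp h).2
      rw [ih n (s ++ "\n\n" ++ n) (ends_append_of_continues s n hcont)]
      rw [show (1 + pvRunB n r) = pvRunB n r + 1 from Nat.add_comm _ _]
      simp only [List.take_succ_cons, List.drop_succ_cons, List.foldl_cons]
    · rw [if_neg h, if_neg (by rw [hE]; exact h)]
      simp only [List.take_zero, List.drop_zero, List.foldl_nil]
      rw [runsRec_cons, ih n n rfl]

lemma getElem?_of_drop_cons (l : List String) (j : Nat) (t : String) (rest : List String)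
    (h : l.drop j = t :: rest) : l[j]? = some t := by
  have h1 : (l.drop j)[0]? = l[j + 0]? := List.getElem?_drop
  rw [h] at h1
  simpa using h1.symm

lemma length_of_drop_cons (l : List String) (j : Nat) (t : String) (rest : List String)
    (h : l.drop j = t :: rest) : l.length = j + 1 + rest.length := by
  have hj : j < l.length := by
    by_contra hc
    rw [List.drop_eq_nil_of_le (by omega)] at h
    exact List.cons_ne_nil t rest h.symm
  have := congrArg List.length h
  simp only [List.length_drop, List.length_cons] at this
  omega

lemma drop_succ_of_drop_cons (l : List String) (j : Nat) (t : String) (rest : List String)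
    (h : l.drop j = t :: rest) : l.drop (j + 1) = rest := by
  have h1 : (l.drop j).drop 1 = rest := by rw [h]; rfl
  rw [List.drop_drop] at h1
  exact h1

-- the precomputed flag at boundary j is the raw-pair test
lemma flags_getD (texts : List String) (j : Nat) (t x : String) (rest : List String)
    (h : texts.drop j = t :: x :: rest) :
    ((texts.zip texts.tail).map (fun p => pvGluedB p.1 p.2)).getD j false = pvGluedB t x := by
  have ht : texts[j]? = some t := getElem?_of_drop_cons _ _ _ _ h
  have hx : texts.tail[j]? = some x := by
    rw [List.getElem?_tail]
    exact getElem?_of_drop_cons _ _ _ _ (drop_succ_of_drop_cons _ _ _ _ h)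
  have hz : (texts.zip texts.tail)[j]? = some (t, x) :=
    List.getElem?_zip_eq_some.mpr ⟨ht, hx⟩
  simp [List.getD_eq_getElem?_getD, List.getElem?_map, hz]

-- the cut loop emits exactly the maximal glued runs
lemma cutLoop_runs (texts : List String) :
    ∀ (rest : List String) (j start : Nat) (t : String),
      texts.drop j = t :: rest → start ≤ j →
      pvCutLoop texts ((texts.zip texts.tail).map (fun p => pvGluedB p.1 p.2)) j start =
        PySem.Str.join "\n\n" ((texts.drop start).take (j + 1 + pvRunB t rest - start))
          :: pvRunsRec (rest.drop (pvRunB t rest)) := by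
  intro rest
  induction rest with
  | nil =>
    intro j start t h hsj
    have hlen := length_of_drop_cons _ _ _ _ h
    simp only [List.length_nil] at hlen
    rw [pvCutLoop, if_pos (by omega), if_pos (by simp [hlen])]
    rw [pvCutLoop, if_neg (by omega)]
    rw [PySem.List.slice_natCast]
    simp [pvRunB, show pvRunsRec [] = [] from by rw [pvRunsRec]]
  | cons x rest' ih =>
    intro j start t h hsj
    have hlen := length_of_drop_cons _ _ _ _ h
    simp only [List.length_cons] at hlen
    have hdrop1 : texts.drop (j + 1) = x :: rest' := drop_succ_of_drop_cons _ _ _ _ h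
    have hflag := flags_getD _ _ _ _ _ h
    rw [pvCutLoop, if_pos (by omega)]
    rw [pvRunB]
    by_cases hg : pvGluedB t x = true
    · have hc1 : (decide (j + 1 = texts.length)) = false := by simp; omega
      have hc2 : (!(((texts.zip texts.tail).map (fun p => pvGluedB p.1 p.2)).getD j false)) = false := by
        rw [hflag, hg]; rfl
      rw [if_neg (by
        intro hC
        rw [Bool.or_eq_true] at hC
        rcases hC with hh | hh
        · rw [hc1] at hh; exact Bool.false_ne_true hh
        · rw [hc2] at hh; exact Bool.false_ne_true hh), if_pos hg]
      rw [ih (j + 1) start x hdrop1 (by omega)]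
      rw [show j + 1 + 1 + pvRunB x rest' = j + 1 + (1 + pvRunB x rest') from by omega]
      rw [show (1 + pvRunB x rest') = pvRunB x rest' + 1 from Nat.add_comm _ _,
        List.drop_succ_cons]
    · have hg' : pvGluedB t x = false := by simpa using hg
      have hc2 : (!(((texts.zip texts.tail).map (fun p => pvGluedB p.1 p.2)).getD j false)) = true := by
        rw [hflag, hg']; rfl
      rw [if_pos (by rw [Bool.or_eq_true]; exact Or.inr hc2), if_neg hg]
      rw [ih (j + 1) (j + 1) x hdrop1 le_rfl]
      rw [PySem.List.slice_natCast, hdrop1]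
      rw [show j + 1 + 1 + pvRunB x rest' - (j + 1) = pvRunB x rest' + 1 from by omega,
        List.take_succ_cons]
      rw [List.drop_zero,
        show pvRunsRec (x :: rest') =
          PySem.Str.join "\n\n" (x :: rest'.take (pvRunB x rest'))
            :: pvRunsRec (rest'.drop (pvRunB x rest')) from by rw [pvRunsRec]]

-- ===== VERDICT =====
theorem merge_split_tables_py_spec : Claim_equal_merge_split_tables_py := by
  intro texts _
  unfold Spec_merge_split_tables_py merge_split_tables_py_alt
  match texts with
  | [] =>
    rw [show merge_split_tables_py [] = [] from rfl, pvCutLoop]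
    simp
  | t :: rest =>
    rw [show merge_split_tables_py (t :: rest) = pvMergeLoopA t rest from rfl,
      mergeA_run rest t t rfl,
      cutLoop_runs (t :: rest) rest 0 0 t (by rfl) le_rfl]
    rw [show (t :: rest).drop 0 = t :: rest from rfl,
      show 0 + 1 + pvRunB t rest - 0 = pvRunB t rest + 1 from by omega,
      List.take_succ_cons, str_join_cons]
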